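-- pv_equiv track=rewrite | github.com/sujiny-tech/k-digital-training-AI-dev | Data structure & Algorithm/Programmers-algorithm-problem/lv2_짝지어 제거하기.py | solution
-- ===== SOURCE A (Python) =====
-- def solution(s):
--     stack=[]
--     #습관인가 while문을 써서 pop해서 뽑아쓰는데
--     #안뽑아도 되는곳에선 for문 활용하자.
--     for c in s:
--         #쌓여있는게 없으면 append
--         if not stack:
--             stack.append(c)
--         else:
--             #이전에 쌓인거랑 같으면, 스택에서 pop
--             if stack[-1]==c:
--                 stack.pop()
--             else:
--                 #다르면 스택에 append
--                 stack.append(c)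
--
--     #스택에 남아있으면 짝이 안맞는거
--     if len(stack)!=0:
--         return 0
--     return 1
-- ===== SOURCE B (Python) =====
-- def solution(s):
--     chars = list(s)
--     changed = True
--     while changed:
--         changed = False
--         for i in range(len(chars) - 1):
--             if chars[i] == chars[i + 1]:
--                 del chars[i:i + 2]
--                 changed = True
--                 break
--     return 1 if not chars else 0
-- ===== Notes on version B (the rewrite author's own statement) =====
-- stated objective: alternative
-- what changed: Replaces the single-pass stack reduction with a repeated whole-string scan that deletes the first adjacent equal pair and rescans until the string is in normal form.
import Mathlib
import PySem

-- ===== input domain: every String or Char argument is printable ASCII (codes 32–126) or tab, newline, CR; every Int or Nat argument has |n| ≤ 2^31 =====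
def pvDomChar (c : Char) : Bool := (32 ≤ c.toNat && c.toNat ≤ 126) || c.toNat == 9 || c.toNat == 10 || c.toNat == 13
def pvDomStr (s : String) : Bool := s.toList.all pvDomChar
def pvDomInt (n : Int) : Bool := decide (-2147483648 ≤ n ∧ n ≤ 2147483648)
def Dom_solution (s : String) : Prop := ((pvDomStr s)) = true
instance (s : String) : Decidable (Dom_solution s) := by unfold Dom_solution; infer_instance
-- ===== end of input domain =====

-- B replaces A's single-pass stack reduction by a repeated scan-and-delete loop
-- (remove the first adjacent equal pair, rescan until none remains): alternative algorithm, same result.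


-- ===== PORT A =====
-- stack kept top-at-head (Python appends/pops at the end; the list is the same stack reversed)
def aStep (st : List Char) (c : Char) : List Char :=
  match st with
  | [] => [c]
  | d :: t => if d = c then t else c :: d :: t

def solution (s : String) : Int :=
  let stack := s.toList.foldl aStep []
  if stack.length ≠ 0 then 0 else 1

-- ===== PORT B =====
-- one scan of the for-loop: delete the FIRST adjacent equal pair, none if no pair exists
def bScan (l : List Char) : Option (List Char) :=
  match l with
  | a :: b :: t => if a = b then some t else (bScan (b :: t)).map (a :: ·)
  | _ => none

theorem bScan_length {l l' : List Char} (h : bScan l = some l') :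
    l'.length < l.length := by
  induction l generalizing l' with
  | nil => simp [bScan] at h
  | cons a t ih =>
    match t, h with
    | b :: t, h =>
      unfold bScan at h
      split at h
      · cases h; simp
      · simp only [Option.map_eq_some_iff] at h
        obtain ⟨w, hw, rfl⟩ := h
        have := ih hw
        simpa using Nat.succ_lt_succ this

-- the while-changed loop: rescan after every deletion
def bLoop (l : List Char) : List Char :=
  match hs : bScan l with
  | some l' => bLoop l'
  | none => l
termination_by l.length
decreasing_by exact bScan_length hs

def solution_alt (s : String) : Int :=
  if bLoop s.toList = [] then 1 else 0

-- ===== PRECONDITION & SPEC =====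
def Spec_solution (s : String) (out : Int) : Prop := out = solution_alt s
instance (s : String) (out : Int) : Decidable (Spec_solution s out) := by unfold Spec_solution; infer_instance

-- ===== CLAIM (what is proved, stated in full; the proofs are below) =====
def Claim_equal_solution : Prop := ∀ (s : String), Dom_solution s → Spec_solution s (solution s)

-- ===== LEMMAS AND PROOFS =====

-- a stack never carries two equal adjacent entries
def NoAdj (l : List Char) : Prop := l.IsChain (· ≠ ·)

theorem noAdj_aStep {st : List Char} (c : Char) (h : NoAdj st) : NoAdj (aStep st c) := by
  match st with
  | [] => exact List.isChain_singleton c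
  | d :: t =>
    by_cases hdc : d = c
    · simpa [NoAdj, aStep, hdc] using h.tail
    · simpa [NoAdj, aStep, hdc] using List.isChain_cons_cons.mpr ⟨Ne.symm hdc, h⟩

theorem aStep_aStep {st : List Char} (c : Char) (h : NoAdj st) :
    aStep (aStep st c) c = st := by
  match st with
  | [] => simp [aStep]
  | d :: t =>
    by_cases hdc : d = c
    · subst hdc
      match t, h with
      | [], _ => simp [aStep]
      | e :: t, h =>
        have hne : d ≠ e := List.rel_of_isChain_cons_cons h
        simp [aStep, Ne.symm hne]
    · simp [aStep, hdc]

-- one deletion of B's scan does not change A's final stack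
theorem foldl_bScan {l l' : List Char} (h : bScan l = some l')
    {st : List Char} (hst : NoAdj st) :
    l.foldl aStep st = l'.foldl aStep st := by
  induction l generalizing l' st with
  | nil => simp [bScan] at h
  | cons a t ih =>
    match t, h with
    | b :: t, h =>
      unfold bScan at h
      split at h
      · cases h
        subst ‹a = b›
        simp [List.foldl, aStep_aStep a hst]
      · simp only [Option.map_eq_some_iff] at h
        obtain ⟨w, hw, rfl⟩ := h
        simp only [List.foldl]
        exact ih hw (noAdj_aStep a hst)

-- the whole while-loop does not change A's final stack
theorem foldl_bLoop (l : List Char) {st : List Char} (hst : NoAdj st) :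
    (bLoop l).foldl aStep st = l.foldl aStep st := by
  induction l using bLoop.induct with
  | case1 l l' hs ih =>
    rw [bLoop, hs, ih, foldl_bScan hs hst]
  | case2 l hs =>
    rw [bLoop, hs]

-- when no pair remains, the string itself has no equal adjacent characters
theorem bScan_none {l : List Char} (h : bScan l = none) : NoAdj l := by
  induction l with
  | nil => exact List.isChain_nil
  | cons a t ih =>
    match t, h with
    | [], _ => exact List.isChain_singleton a
    | b :: t, h =>
      unfold bScan at h
      split at h
      · exact absurd h (by simp)
      · simp only [Option.map_eq_none_iff] at h
        exact List.isChain_cons_cons.mpr ⟨‹¬ a = b›, ih h⟩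

theorem bScan_bLoop (l : List Char) : bScan (bLoop l) = none := by
  induction l using bLoop.induct with
  | case1 l l' hs ih => rw [bLoop, hs]; exact ih
  | case2 l hs => rw [bLoop, hs]; exact hs

-- a pair-free string is pushed entirely: the stack is its reverse
theorem foldl_noAdj_aux (l : List Char) (c : Char) (st : List Char)
    (h : NoAdj (c :: l)) :
    l.foldl aStep (c :: st) = l.reverse ++ c :: st := by
  induction l generalizing c st with
  | nil => rfl
  | cons b t ih =>
    have hcb : c ≠ b := List.rel_of_isChain_cons_cons h
    simp only [List.foldl, aStep, if_neg hcb]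
    rw [ih b (c :: st) h.tail]
    simp

theorem foldl_noAdj (l : List Char) (h : NoAdj l) :
    l.foldl aStep [] = l.reverse := by
  match l with
  | [] => rfl
  | c :: t =>
    simp only [List.foldl, aStep]
    rw [foldl_noAdj_aux t c [] h]
    simp

theorem stack_eq_reverse_bLoop (l : List Char) :
    l.foldl aStep [] = (bLoop l).reverse := by
  rw [← foldl_bLoop l (st := []) List.isChain_nil]
  exact foldl_noAdj _ (bScan_none (bScan_bLoop l))

-- ===== VERDICT (by name: the statement is the Claim_ definition above) =====
theorem solution_spec : Claim_equal_solution := by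
  intro s _
  unfold Spec_solution solution solution_alt
  rw [stack_eq_reverse_bLoop]
  rcases h : bLoop s.toList with _ | ⟨c, t⟩ <;> simp
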